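-- pv_equiv track=rewrite | github.com/keyang556/linedesktopnvda | addon/appModules/_chatCache.py | _timeMatches
-- ===== SOURCE A (Python) =====
-- def _timeMatches(msgTime, ocrTimes):
-- 	"""True if msgTime equals any OCR time, allowing single-digit-minute prefix."""
-- 	if not msgTime or not ocrTimes:
-- 		return False
-- 	for t in ocrTimes:
-- 		if msgTime == t:
-- 			return True
-- 		# OCR may have truncated minutes (e.g. "15:1" matches "15:10"–"15:19")
-- 		if len(t) < len(msgTime) and msgTime.startswith(t):
-- 			return True
-- 	return False
-- ===== SOURCE B (Python) =====
-- def _timeMatches(msgTime, ocrTimes):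
-- 	"""True if msgTime equals any OCR time, allowing single-digit-minute prefix."""
-- 	if not msgTime or not ocrTimes:
-- 		return False
-- 	times = set(ocrTimes)
-- 	for L in {len(t) for t in times}:
-- 		if L <= len(msgTime) and msgTime[:L] in times:
-- 			return True
-- 	return False
-- ===== Notes on version B (the rewrite author's own statement) =====
-- stated objective: alternative
-- what changed: Instead of scanning ocrTimes and testing equality/startswith against each candidate, B builds a set of ocrTimes once, collects the distinct candidate lengths, and tests membership of the prefix msgTime[:L] for each such length L.
import Mathlib
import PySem

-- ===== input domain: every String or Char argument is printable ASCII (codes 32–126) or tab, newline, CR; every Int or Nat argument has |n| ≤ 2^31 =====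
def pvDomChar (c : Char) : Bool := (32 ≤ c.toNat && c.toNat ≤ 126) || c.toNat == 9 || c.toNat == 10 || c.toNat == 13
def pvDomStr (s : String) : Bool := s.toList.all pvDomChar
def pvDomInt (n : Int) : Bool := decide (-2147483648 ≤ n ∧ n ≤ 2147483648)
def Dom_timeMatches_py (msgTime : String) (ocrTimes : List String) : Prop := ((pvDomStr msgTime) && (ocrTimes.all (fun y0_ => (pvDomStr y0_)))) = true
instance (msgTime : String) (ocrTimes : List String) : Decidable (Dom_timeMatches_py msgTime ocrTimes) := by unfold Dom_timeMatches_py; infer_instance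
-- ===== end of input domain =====

-- B replaces A's per-candidate equality/startswith scan of ocrTimes by a set of ocrTimes
-- queried once for each candidate prefix length occurring in the set; return values are identical.

-- ===== PORT A =====
-- the `for t in ocrTimes` loop with its two early returns
def pvLoopA (msgTime : String) : List String → Bool
  | [] => false
  | t :: rest =>
    if msgTime = t then true
    else if PySem.Str.len t < PySem.Str.len msgTime ∧ PySem.Str.startswith msgTime t then true
    else pvLoopA msgTime rest

def timeMatches_py (msgTime : String) (ocrTimes : List String) : Bool :=
  if msgTime = "" ∨ ocrTimes = [] then false
  else pvLoopA msgTime ocrTimes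

-- ===== PORT B =====
-- the `for L in {len(t) for t in times}` loop with its early return
def pvLoopB (msgTime : String) (times : PySem.Set String) : List Int → Bool
  | [] => false
  | L :: rest =>
    if L ≤ PySem.Str.len msgTime ∧
        PySem.Set.contains times (PySem.Str.slice msgTime none (some L)) then true
    else pvLoopB msgTime times rest

def timeMatches_py_alt (msgTime : String) (ocrTimes : List String) : Bool :=
  if msgTime = "" ∨ ocrTimes = [] then false
  else
    let times := PySem.Set.ofList ocrTimes
    pvLoopB msgTime times (PySem.Set.ofList (times.map PySem.Str.len))

-- ===== PRECONDITION & SPEC =====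
def Spec_timeMatches_py (msgTime : String) (ocrTimes : List String) (out : Bool) : Prop := out = timeMatches_py_alt msgTime ocrTimes
instance (msgTime : String) (ocrTimes : List String) (out : Bool) : Decidable (Spec_timeMatches_py msgTime ocrTimes out) := by unfold Spec_timeMatches_py; infer_instance

-- ===== CLAIM (what is proved, stated in full; the proofs are below) =====
def Claim_equal_timeMatches_py : Prop := ∀ (msgTime : String) (ocrTimes : List String), Dom_timeMatches_py msgTime ocrTimes → Spec_timeMatches_py msgTime ocrTimes (timeMatches_py msgTime ocrTimes)

-- ===== LEMMAS AND PROOFS =====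

-- A's loop succeeds exactly when some element of the list is a prefix of msgTime.
theorem pvLoopA_iff (m : String) (l : List String) :
    pvLoopA m l = true ↔ ∃ t ∈ l, t.toList <+: m.toList := by
  induction l with
  | nil => simp [pvLoopA]
  | cons t rest ih =>
    simp only [pvLoopA]
    split_ifs with h1 h2
    · subst h1; simp
    · constructor
      · intro _; exact ⟨t, List.mem_cons_self ..,
          (PySem.Chars.startswith_iff ..).mp (by simpa using h2.2)⟩
      · intro _; rfl
    · rw [ih]
      constructor
      · rintro ⟨u, hu, hp⟩; exact ⟨u, List.mem_cons_of_mem _ hu, hp⟩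
      · rintro ⟨u, hu, hp⟩
        rcases List.mem_cons.mp hu with rfl | hu
        · -- u = t : t is a prefix of m yet neither branch fired — contradiction
          exfalso
          rcases lt_or_eq_of_le hp.length_le with hlt | hle
          · exact h2 ⟨by simpa [PySem.Str.len_eq] using (Int.ofNat_lt.mpr hlt),
              by simpa [PySem.Str.startswith_eq] using (PySem.Chars.startswith_iff ..).mpr hp⟩
          · exact h1 (String.toList_inj.mp (List.prefix_iff_eq_take.mp hp ▸ by
              simp [hle])).symm
        · exact ⟨u, hu, hp⟩

-- B's loop succeeds exactly when some length in the list yields a prefix in the set.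
theorem pvLoopB_iff (m : String) (s : PySem.Set String) (is : List Int) :
    pvLoopB m s is = true ↔
      ∃ L ∈ is, L ≤ PySem.Str.len m ∧
        PySem.Set.contains s (PySem.Str.slice m none (some L)) = true := by
  induction is with
  | nil => simp [pvLoopB]
  | cons i rest ih =>
    simp only [pvLoopB]
    split_ifs with h
    · exact ⟨fun _ => ⟨i, List.mem_cons_self .., h⟩, fun _ => rfl⟩
    · rw [ih]
      constructor
      · rintro ⟨j, hj, hc⟩; exact ⟨j, List.mem_cons_of_mem _ hj, hc⟩
      · rintro ⟨j, hj, hc⟩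
        rcases List.mem_cons.mp hj with rfl | hj
        · exact absurd hc h
        · exact ⟨j, hj, hc⟩

theorem pv_contains_ofList (l : List String) (x : String) :
    PySem.Set.contains (PySem.Set.ofList l) x = true ↔ x ∈ l := by
  rw [show PySem.Set.contains (PySem.Set.ofList l) x = true ↔ x ∈ PySem.Set.ofList l from
    List.contains_iff_mem]
  exact PySem.Set.mem_ofList l x

-- the two existential characterisations coincide
theorem pv_exists_iff (m : String) (l : List String) :
    (∃ t ∈ l, t.toList <+: m.toList) ↔
      ∃ L ∈ PySem.Set.ofList ((PySem.Set.ofList l).map PySem.Str.len),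
        L ≤ PySem.Str.len m ∧
        PySem.Set.contains (PySem.Set.ofList l) (PySem.Str.slice m none (some L)) = true := by
  constructor
  · rintro ⟨t, ht, hp⟩
    refine ⟨PySem.Str.len t, ?_, ?_, ?_⟩
    · rw [PySem.Set.mem_ofList]
      exact List.mem_map_of_mem ((PySem.Set.mem_ofList l t).mpr ht)
    · have := hp.length_le
      rw [PySem.Str.len_eq, PySem.Str.len_eq]
      omega
    · rw [pv_contains_ofList]
      have hsl : (PySem.Str.slice m none (some (PySem.Str.len t))).toList = t.toList := by
        rw [PySem.Str.toList_slice, PySem.Chars.slice_eq_listSlice, PySem.Str.len_eq,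
          PySem.List.slice_to m.toList (Int.natCast_nonneg _)]
        rw [Int.toNat_natCast]
        exact (List.prefix_iff_eq_take.mp hp).symm
      rw [String.toList_inj.mp hsl]
      exact ht
  · rintro ⟨L, hL, hle, hc⟩
    rw [PySem.Set.mem_ofList] at hL
    obtain ⟨u, _, rfl⟩ := List.mem_map.mp hL
    rw [pv_contains_ofList] at hc
    refine ⟨_, hc, ?_⟩
    rw [PySem.Str.toList_slice, PySem.Chars.slice_eq_listSlice, PySem.Str.len_eq,
      PySem.List.slice_to m.toList (Int.natCast_nonneg _)]
    exact List.take_prefix _ _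

-- ===== VERDICT (by name: the statement is the Claim_ definition above) =====
theorem timeMatches_py_spec : Claim_equal_timeMatches_py := by
  intro m l _
  unfold Spec_timeMatches_py timeMatches_py timeMatches_py_alt
  split_ifs with h
  · rfl
  · rw [Bool.eq_iff_iff, pvLoopA_iff, pvLoopB_iff]
    exact pv_exists_iff m l
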